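-- pv_equiv track=rewrite | github.com/ZacharyTaylor/Catkin-Builder | Catkin-Builder.py | firstErr
-- ===== SOURCE A (Python) =====
-- def firstErr(str_in):
--   error_flag = 'error: '
--   linker_flag = 'undefined reference to '
--   note_flag = 'note: '
--   include_flag = 'In file included from '
--   end_flag = 'Error 1'
--
--   err_str = '\nErrors encountered, reprinting first error:\n...............................................................................\n'
--   err_free = True
--   keep = False
--
--   for line in str_in.splitlines():
--     if err_free and ((error_flag in line) or (linker_flag in line)):
--       keep = True
--       err_free = False
--     elif any(s in line for s in (error_flag, linker_flag, note_flag, include_flag, end_flag)):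
--       keep = False
--
--     if keep:
--       err_str += line + '\n'
--
--   #remove last enter
--   err_str = err_str[:-1]
--
--   return(err_str, err_free)
-- ===== SOURCE B (Python) =====
-- def firstErr(str_in):
--   error_flag = 'error: '
--   linker_flag = 'undefined reference to '
--   flags = (error_flag, linker_flag, 'note: ', 'In file included from ', 'Error 1')
--
--   header = '\nErrors encountered, reprinting first error:\n...............................................................................\n'
--
--   lines = str_in.splitlines()
--
--   # Phase 1: locate the first line that starts an error block.
--   start = None
--   for i, line in enumerate(lines):
--     if error_flag in line or linker_flag in line:
--       start = i
--       break
--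
--   if start is None:
--     return (header[:-1], True)
--
--   # Phase 2: the block is the start line plus following lines up to (excluding)
--   # the next line carrying any flag.
--   block = [lines[start]]
--   for line in lines[start + 1:]:
--     if any(f in line for f in flags):
--       break
--     block.append(line)
--
--   err_str = header + ''.join(line + '\n' for line in block)
--   return (err_str[:-1], False)
-- ===== Notes on version B (the rewrite author's own statement) =====
-- stated objective: simpler
-- what changed: Replaced A's single loop over three implicit modes (err_free/keep flags) by two phases: find the first line carrying an error/linker flag, then take following lines until the next flagged line, and assemble the result once.
import Mathlib
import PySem

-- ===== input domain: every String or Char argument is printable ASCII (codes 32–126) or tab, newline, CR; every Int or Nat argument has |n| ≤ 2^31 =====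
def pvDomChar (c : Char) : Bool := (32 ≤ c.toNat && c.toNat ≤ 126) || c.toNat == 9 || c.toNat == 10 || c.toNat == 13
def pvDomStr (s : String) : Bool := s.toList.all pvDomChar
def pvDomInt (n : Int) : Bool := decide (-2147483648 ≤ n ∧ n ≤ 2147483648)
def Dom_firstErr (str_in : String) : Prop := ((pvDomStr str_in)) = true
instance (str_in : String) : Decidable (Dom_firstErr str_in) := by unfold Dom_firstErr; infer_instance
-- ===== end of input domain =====

-- B replaces A's single three-mode flag-driven loop by two phases: find the first line
-- with an error/linker flag, then take following lines up to the first flagged line (objective: simpler).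

-- shared string constants (the Python literals of both programs)
def feErrorFlag : List Char := "error: ".toList
def feLinkerFlag : List Char := "undefined reference to ".toList
def feNoteFlag : List Char := "note: ".toList
def feIncludeFlag : List Char := "In file included from ".toList
def feEndFlag : List Char := "Error 1".toList
def feHeader : List Char := "\nErrors encountered, reprinting first error:\n...............................................................................\n".toList

-- ===== PORT A =====
-- the body of A's for-loop: state (err_free, keep, err_str)
def feStepA (st : Bool × Bool × List Char) (line : List Char) : Bool × Bool × List Char :=
  let (errFree, keep, errStr) := st
  let (keep, errFree) :=
    if errFree && (PySem.Chars.isIn feErrorFlag line || PySem.Chars.isIn feLinkerFlag line) then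
      (true, false)
    else if PySem.Chars.isIn feErrorFlag line || PySem.Chars.isIn feLinkerFlag line ||
            PySem.Chars.isIn feNoteFlag line || PySem.Chars.isIn feIncludeFlag line ||
            PySem.Chars.isIn feEndFlag line then
      (false, errFree)
    else (keep, errFree)
  let errStr := if keep then errStr ++ line ++ ['\n'] else errStr
  (errFree, keep, errStr)

def firstErr (str_in : String) : String × Bool :=
  let lines := (PySem.Str.splitlines str_in).map String.toList
  let r := lines.foldl feStepA (true, false, feHeader)
  -- err_str[:-1]
  (String.ofList (PySem.Chars.slice r.2.2 none (some (-1))), r.1)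

-- ===== PORT B =====
def feHasStart (line : List Char) : Bool :=
  PySem.Chars.isIn feErrorFlag line || PySem.Chars.isIn feLinkerFlag line

def feHasFlag (line : List Char) : Bool :=
  feHasStart line || PySem.Chars.isIn feNoteFlag line ||
  PySem.Chars.isIn feIncludeFlag line || PySem.Chars.isIn feEndFlag line

def firstErr_alt (str_in : String) : String × Bool :=
  let lines := (PySem.Str.splitlines str_in).map String.toList
  -- phase 1: first line carrying a start flag, with the lines after it
  match lines.dropWhile (fun l => !feHasStart l) with
  | [] => (String.ofList (PySem.Chars.slice feHeader none (some (-1))), true)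
  | first :: rest =>
    -- phase 2: block = start line + following lines before the next flagged line
    let block := first :: rest.takeWhile (fun l => !feHasFlag l)
    let errStr := feHeader ++ (block.map (fun l => l ++ ['\n'])).flatten
    (String.ofList (PySem.Chars.slice errStr none (some (-1))), false)

-- ===== PRECONDITION & SPEC =====
def Spec_firstErr (str_in : String) (out : String × Bool) : Prop := out = firstErr_alt str_in
instance (str_in : String) (out : String × Bool) : Decidable (Spec_firstErr str_in out) := by unfold Spec_firstErr; infer_instance

-- ===== CLAIM (what is proved, stated in full; the proofs are below) =====
def Claim_equal_firstErr : Prop := ∀ (str_in : String), Dom_firstErr str_in → Spec_firstErr str_in (firstErr str_in)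

-- ===== LEMMAS AND PROOFS =====

theorem feHasFlag_eq (l : List Char) :
    feHasFlag l = (PySem.Chars.isIn feErrorFlag l || PySem.Chars.isIn feLinkerFlag l ||
      PySem.Chars.isIn feNoteFlag l || PySem.Chars.isIn feIncludeFlag l ||
      PySem.Chars.isIn feEndFlag l) := by
  simp [feHasFlag, feHasStart, Bool.or_assoc]

-- once err_free = false and keep = false, the loop changes nothing
theorem feFold_dead (lines : List (List Char)) (acc : List Char) :
    lines.foldl feStepA (false, false, acc) = (false, false, acc) := by
  induction lines with
  | nil => rfl
  | cons l ls ih =>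
    simp only [List.foldl_cons]
    have : feStepA (false, false, acc) l = (false, false, acc) := by
      simp [feStepA]
    rw [this, ih]

-- in collecting mode the loop appends exactly the lines before the next flagged line
theorem feFold_collect (lines : List (List Char)) (acc : List Char) :
    lines.foldl feStepA (false, true, acc) =
      (false, lines.all (fun l => !feHasFlag l),
       acc ++ ((lines.takeWhile (fun l => !feHasFlag l)).map (fun l => l ++ ['\n'])).flatten) := by
  induction lines generalizing acc with
  | nil => simp
  | cons l ls ih =>
    by_cases h : feHasFlag l = true
    · have hstep : feStepA (false, true, acc) l = (false, false, acc) := by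
        rw [feHasFlag_eq] at h
        simp [feStepA, h]
      simp only [List.foldl_cons, hstep, feFold_dead, List.all_cons, h,
        List.takeWhile_cons, Bool.not_true]
      simp
    · have h' : feHasFlag l = false := by simpa using h
      have hstep : feStepA (false, true, acc) l = (false, true, acc ++ l ++ ['\n']) := by
        rw [feHasFlag_eq] at h'
        simp only [Bool.or_eq_false_iff] at h'
        simp [feStepA, h'.1, h'.2]
      simp only [List.foldl_cons, hstep, ih, List.all_cons, h', Bool.not_false, Bool.true_and,
        List.takeWhile_cons]
      simp [List.append_assoc]

-- in searching mode the loop skips lines without a start flag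
theorem feFold_search_nil (lines : List (List Char)) (acc : List Char)
    (h : lines.dropWhile (fun l => !feHasStart l) = []) :
    lines.foldl feStepA (true, false, acc) = (true, false, acc) := by
  induction lines with
  | nil => rfl
  | cons l ls ih =>
    rw [List.dropWhile_cons] at h
    by_cases hs : feHasStart l = true
    · simp [hs] at h
    · have hs' : feHasStart l = false := by simpa using hs
      simp only [hs', Bool.not_false] at h
      have hstep : feStepA (true, false, acc) l = (true, false, acc) := by
        simp only [feHasStart, Bool.or_eq_false_iff] at hs'
        simp [feStepA, hs'.1, hs'.2]
      rw [List.foldl_cons, hstep, ih h]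

theorem feFold_search_cons (lines : List (List Char)) (acc : List Char)
    (first : List Char) (rest : List (List Char))
    (h : lines.dropWhile (fun l => !feHasStart l) = first :: rest) :
    lines.foldl feStepA (true, false, acc) =
      (false, rest.all (fun l => !feHasFlag l),
       acc ++ first ++ ['\n'] ++
         ((rest.takeWhile (fun l => !feHasFlag l)).map (fun l => l ++ ['\n'])).flatten) := by
  induction lines generalizing acc with
  | nil => simp at h
  | cons l ls ih =>
    rw [List.dropWhile_cons] at h
    by_cases hs : feHasStart l = true
    · simp only [hs, Bool.not_true] at h
      obtain ⟨rfl, rfl⟩ : l = first ∧ ls = rest := by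
        cases h; exact ⟨rfl, rfl⟩
      have hstep : feStepA (true, false, acc) l = (false, true, acc ++ l ++ ['\n']) := by
        simp [feStepA, feHasStart] at hs ⊢
        rcases hs with h1 | h1 <;> simp [h1]
      rw [List.foldl_cons, hstep, feFold_collect]
    · have hs' : feHasStart l = false := by simpa using hs
      simp only [hs', Bool.not_false] at h
      have hstep : feStepA (true, false, acc) l = (true, false, acc) := by
        simp only [feHasStart, Bool.or_eq_false_iff] at hs'
        simp [feStepA, hs'.1, hs'.2]
      rw [List.foldl_cons, hstep, ih acc h]

-- ===== VERDICT (by name: the statement is the Claim_ definition above) =====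
theorem firstErr_spec : Claim_equal_firstErr := by
  intro str_in _
  unfold Spec_firstErr firstErr firstErr_alt
  dsimp only
  cases h : ((PySem.Str.splitlines str_in).map String.toList).dropWhile (fun l => !feHasStart l) with
  | nil =>
    rw [feFold_search_nil _ _ h]
  | cons first rest =>
    rw [feFold_search_cons _ _ _ _ h]
    simp [List.append_assoc]
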